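-- pv_equiv track=rewrite | github.com/arcade-cabinet/dragons-labyrinth | src/generator/analysis/cross_validation.py | _estimate_json_corruption_level
-- ===== SOURCE A (Python) =====
-- def _estimate_json_corruption_level(region_name: str) -> int:
--     """Estimate corruption level from region name for JSON comparison."""
--
--     # Use same logic as enhanced regions processor
--     name_lower = region_name.lower()
--
--     if any(word in name_lower for word in ["dragon", "scar", "abyssal", "chasm", "final"]):
--         return 5
--     elif any(word in name_lower for word in ["nightmare", "hell", "vicious", "void"]):
--         return 4
--     elif any(word in name_lower for word in ["blood", "bone", "death", "decay", "rust", "famine"]):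
--         return 3
--     elif any(word in name_lower for word in ["black", "dark", "cursed", "haunted", "fear", "dread"]):
--         return 2
--     elif any(word in name_lower for word in ["grey", "ash", "ashen", "shadow"]):
--         return 1
--     else:
--         return 0
-- ===== SOURCE B (Python) =====
-- _KEYWORD_LEVELS = {
--     "dragon": 5, "scar": 5, "abyssal": 5, "chasm": 5, "final": 5,
--     "nightmare": 4, "hell": 4, "vicious": 4, "void": 4,
--     "blood": 3, "bone": 3, "death": 3, "decay": 3, "rust": 3, "famine": 3,
--     "black": 2, "dark": 2, "cursed": 2, "haunted": 2, "fear": 2, "dread": 2,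
--     "grey": 1, "ash": 1, "ashen": 1, "shadow": 1,
-- }
--
--
-- def _estimate_json_corruption_level(region_name: str) -> int:
--     """Estimate corruption level: max level of any keyword found in the name."""
--     name_lower = region_name.lower()
--     level = 0
--     for keyword, kw_level in _KEYWORD_LEVELS.items():
--         if keyword in name_lower and kw_level > level:
--             level = kw_level
--     return level
-- ===== Notes on version B (the rewrite author's own statement) =====
-- stated objective: simpler
-- what changed: Replaces the five-branch if/elif chain of any(...) scans with one flat keyword->level table and a single max-accumulating pass over it.
import Mathlib
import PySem

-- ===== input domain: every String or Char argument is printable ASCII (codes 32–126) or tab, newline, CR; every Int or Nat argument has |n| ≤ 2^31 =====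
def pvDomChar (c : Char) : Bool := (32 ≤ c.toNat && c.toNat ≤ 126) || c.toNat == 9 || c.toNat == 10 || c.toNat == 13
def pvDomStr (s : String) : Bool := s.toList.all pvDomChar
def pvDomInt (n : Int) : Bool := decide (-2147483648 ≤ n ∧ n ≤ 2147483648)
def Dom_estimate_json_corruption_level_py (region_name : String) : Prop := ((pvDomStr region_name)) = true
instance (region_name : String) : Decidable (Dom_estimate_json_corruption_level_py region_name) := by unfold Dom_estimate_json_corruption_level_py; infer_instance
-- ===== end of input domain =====

-- B replaces A's five-branch if/elif chain with one flat keyword->level table and a single max-accumulating pass (simpler decomposition, same cost).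

-- ===== PORT A =====
def estimate_json_corruption_level_py (region_name : String) : Int :=
  let name_lower := PySem.Str.lower region_name
  if ["dragon", "scar", "abyssal", "chasm", "final"].any (fun w => PySem.Str.isIn w name_lower) then 5
  else if ["nightmare", "hell", "vicious", "void"].any (fun w => PySem.Str.isIn w name_lower) then 4
  else if ["blood", "bone", "death", "decay", "rust", "famine"].any (fun w => PySem.Str.isIn w name_lower) then 3
  else if ["black", "dark", "cursed", "haunted", "fear", "dread"].any (fun w => PySem.Str.isIn w name_lower) then 2
  else if ["grey", "ash", "ashen", "shadow"].any (fun w => PySem.Str.isIn w name_lower) then 1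
  else 0

-- ===== PORT B =====
-- the flat table _KEYWORD_LEVELS from Source B (a dict with distinct literal keys; items() in insertion order = this list)
def pvKwLevels : List (String × Int) :=
  [("dragon", 5), ("scar", 5), ("abyssal", 5), ("chasm", 5), ("final", 5),
   ("nightmare", 4), ("hell", 4), ("vicious", 4), ("void", 4),
   ("blood", 3), ("bone", 3), ("death", 3), ("decay", 3), ("rust", 3), ("famine", 3),
   ("black", 2), ("dark", 2), ("cursed", 2), ("haunted", 2), ("fear", 2), ("dread", 2),
   ("grey", 1), ("ash", 1), ("ashen", 1), ("shadow", 1)]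

def estimate_json_corruption_level_py_alt (region_name : String) : Int :=
  let name_lower := PySem.Str.lower region_name
  pvKwLevels.foldl
    (fun level p => if PySem.Str.isIn p.1 name_lower && decide (p.2 > level) then p.2 else level) 0

-- ===== PRECONDITION & SPEC =====
def Spec_estimate_json_corruption_level_py (region_name : String) (out : Int) : Prop := out = estimate_json_corruption_level_py_alt region_name
instance (region_name : String) (out : Int) : Decidable (Spec_estimate_json_corruption_level_py region_name out) := by unfold Spec_estimate_json_corruption_level_py; infer_instance

-- ===== CLAIM (what is proved, stated in full; the proofs are below) =====
def Claim_equal_estimate_json_corruption_level_py : Prop := ∀ (region_name : String), Dom_estimate_json_corruption_level_py region_name → Spec_estimate_json_corruption_level_py region_name (estimate_json_corruption_level_py region_name)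

-- ===== LEMMAS AND PROOFS =====

-- sup (with 0) of the levels of the table entries whose keyword satisfies m
def pvSup (m : String → Bool) (l : List (String × Int)) : Int :=
  ((l.filter (fun p => m p.1)).map Prod.snd).foldr max 0

theorem pvSup_nil (m : String → Bool) : pvSup m [] = 0 := rfl

theorem pvSup_cons (m : String → Bool) (p : String × Int) (l : List (String × Int)) :
    pvSup m (p :: l) = if m p.1 then max p.2 (pvSup m l) else pvSup m l := by
  simp only [pvSup, List.filter_cons]
  cases hm : m p.1 <;> simp

theorem pvSup_nonneg (m : String → Bool) (l : List (String × Int)) : 0 ≤ pvSup m l := by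
  induction l with
  | nil => simp [pvSup_nil]
  | cons p l ih => rw [pvSup_cons]; split <;> omega

theorem pvFoldl_char (m : String → Bool) (l : List (String × Int)) :
    ∀ a : Int, 0 ≤ a →
    l.foldl (fun level p => if m p.1 && decide (p.2 > level) then p.2 else level) a
      = max a (pvSup m l) := by
  induction l with
  | nil => intro a ha; rw [List.foldl_nil, pvSup_nil]; omega
  | cons p l ih =>
      intro a ha
      rw [List.foldl_cons, pvSup_cons]
      cases hm : m p.1 with
      | false =>
          simp only [Bool.false_and, Bool.false_eq_true, if_false]
          exact ih a ha
      | true =>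
          simp only [Bool.true_and, if_true]
          by_cases hpa : p.2 > a
          · rw [if_pos (by simpa using hpa), ih p.2 (by omega)]
            omega
          · rw [if_neg (by simpa using hpa), ih a ha]
            omega

theorem pvSup_append (m : String → Bool) (l1 l2 : List (String × Int)) :
    pvSup m (l1 ++ l2) = max (pvSup m l1) (pvSup m l2) := by
  induction l1 with
  | nil =>
      have := pvSup_nonneg m l2
      rw [List.nil_append, pvSup_nil]; omega
  | cons p l1 ih =>
      rw [List.cons_append, pvSup_cons, pvSup_cons, ih]
      split <;> omega

theorem pvSup_tier (m : String → Bool) (ws : List String) (L : Int) (hL : 0 ≤ L) :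
    pvSup m (ws.map (fun w => (w, L))) = if ws.any m then L else 0 := by
  induction ws with
  | nil => simp [pvSup_nil]
  | cons w ws ih =>
      rw [List.map_cons, pvSup_cons, List.any_cons, ih]
      have := pvSup_nonneg m (ws.map (fun w => (w, L)))
      cases hm : m w with
      | false => simp
      | true => simp only [if_true, Bool.true_or]; split_ifs <;> omega

theorem pvKwLevels_eq :
    pvKwLevels =
      (["dragon", "scar", "abyssal", "chasm", "final"].map (fun w => (w, (5 : Int))))
      ++ (["nightmare", "hell", "vicious", "void"].map (fun w => (w, (4 : Int))))
      ++ (["blood", "bone", "death", "decay", "rust", "famine"].map (fun w => (w, (3 : Int))))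
      ++ (["black", "dark", "cursed", "haunted", "fear", "dread"].map (fun w => (w, (2 : Int))))
      ++ (["grey", "ash", "ashen", "shadow"].map (fun w => (w, (1 : Int)))) := by
  rfl

-- ===== VERDICT (by name: the statement is the Claim_ definition above) =====
theorem estimate_json_corruption_level_py_spec : Claim_equal_estimate_json_corruption_level_py := by
  intro region_name _
  unfold Spec_estimate_json_corruption_level_py
  simp only [estimate_json_corruption_level_py, estimate_json_corruption_level_py_alt]
  generalize PySem.Str.lower region_name = nl
  have h := pvFoldl_char (fun w => PySem.Str.isIn w nl) pvKwLevels 0 le_rfl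
  simp only [] at h
  rw [h, pvKwLevels_eq, pvSup_append, pvSup_append, pvSup_append, pvSup_append,
      pvSup_tier _ _ _ (by norm_num), pvSup_tier _ _ _ (by norm_num),
      pvSup_tier _ _ _ (by norm_num), pvSup_tier _ _ _ (by norm_num),
      pvSup_tier _ _ _ (by norm_num)]
  cases h5 : ["dragon", "scar", "abyssal", "chasm", "final"].any (fun w => PySem.Str.isIn w nl) <;>
  cases h4 : ["nightmare", "hell", "vicious", "void"].any (fun w => PySem.Str.isIn w nl) <;>
  cases h3 : ["blood", "bone", "death", "decay", "rust", "famine"].any (fun w => PySem.Str.isIn w nl) <;>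
  cases h2 : ["black", "dark", "cursed", "haunted", "fear", "dread"].any (fun w => PySem.Str.isIn w nl) <;>
  cases h1 : ["grey", "ash", "ashen", "shadow"].any (fun w => PySem.Str.isIn w nl) <;>
  simp only [Bool.false_eq_true, if_false, if_true] <;>
  decide
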